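-- pv_equiv track=rewrite | github.com/Sabuti/AnalisadorSemantico_Groupo5_LFC | src/trabalho.py | RESorMEM
-- ===== SOURCE A (Python) =====
-- def RESorMEM(token):
--     if not token:
--         return False
--     estado = "Q0"
--     for ch in token:
--         if estado == "Q0":
--             if ch.isalpha() and ch.isupper():
--                 estado = "QID"
--             else:
--                 return False
--         elif estado == "QID":
--             if not (ch.isalpha() and ch.isupper()) and not ch.isdigit():
--                 return False
--     return estado == "QID"
-- ===== SOURCE B (Python) =====
-- def RESorMEM(token):
--     if not token:
--         return False
--     letters = [ch for ch in token if not ch.isdigit()]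
--     if not letters or letters[0] != token[0]:
--         return False
--     return all(ch.isalpha() and ch.isupper() for ch in letters)
-- ===== Notes on version B (the rewrite author's own statement) =====
-- stated objective: alternative
-- what changed: Replaced A's single-pass two-state automaton by a staged algorithm: first filter all digit characters out of the token, then accept iff the digit-free residue starts at the token's first character and consists solely of uppercase letters.
import Mathlib
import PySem

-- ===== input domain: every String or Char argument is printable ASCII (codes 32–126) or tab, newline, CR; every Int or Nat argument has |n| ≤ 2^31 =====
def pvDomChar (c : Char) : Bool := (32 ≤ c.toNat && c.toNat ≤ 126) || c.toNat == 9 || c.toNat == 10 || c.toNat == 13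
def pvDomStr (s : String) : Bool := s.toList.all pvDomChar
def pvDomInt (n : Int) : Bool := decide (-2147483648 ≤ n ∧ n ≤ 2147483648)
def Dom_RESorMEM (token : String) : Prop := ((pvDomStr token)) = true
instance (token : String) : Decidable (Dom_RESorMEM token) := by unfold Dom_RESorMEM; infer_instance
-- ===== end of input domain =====

-- B replaces A's running two-state automaton by a staged algorithm: filter the digits out first,
-- then validate the residue (all uppercase letters, starting at the token's first character).


-- ===== PORT A =====
def RESorMEMLoop (cs : List Char) (estado : String) : Bool :=
  match cs with
  | [] => estado == "QID"
  | ch :: rest =>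
    if estado == "Q0" then
      if PySem.Chars.isalpha ch && PySem.Chars.isupper ch then
        RESorMEMLoop rest "QID"
      else
        false
    else if estado == "QID" then
      if !(PySem.Chars.isalpha ch && PySem.Chars.isupper ch) && !(PySem.Chars.isdigit ch) then
        false
      else
        RESorMEMLoop rest estado
    else
      RESorMEMLoop rest estado

def RESorMEM (token : String) : Bool :=
  if token == "" then false
  else RESorMEMLoop token.toList "Q0"

-- ===== PORT B =====
-- B: filter out the digits, then the residue must be all uppercase letters and start at token[0]
def RESorMEM_alt (token : String) : Bool :=
  if token == "" then false
  else
    let letters := token.toList.filter (fun ch => !PySem.Chars.isdigit ch)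
    match letters, token.toList with
    | l0 :: _, t0 :: _ =>
        if l0 != t0 then false
        else letters.all (fun ch => PySem.Chars.isalpha ch && PySem.Chars.isupper ch)
    | _, _ => false

-- ===== PRECONDITION & SPEC =====
def Spec_RESorMEM (token : String) (out : Bool) : Prop := out = RESorMEM_alt token
instance (token : String) (out : Bool) : Decidable (Spec_RESorMEM token out) := by unfold Spec_RESorMEM; infer_instance

-- ===== CLAIM (what is proved, stated in full; the proofs are below) =====
def Claim_equal_RESorMEM : Prop := ∀ (token : String), Dom_RESorMEM token → Spec_RESorMEM token (RESorMEM token)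

-- ===== LEMMAS AND PROOFS =====
theorem upper_not_digit (c : Char) (h : PySem.Chars.isupper c = true) :
    PySem.Chars.isdigit c = false := by
  simp [PySem.Chars.isdigit, PySem.Chars.isupper, Char.le_def, UInt32.le_iff_toNat_le] at *
  omega

theorem digit_not_upper (c : Char) (h : PySem.Chars.isdigit c = true) :
    PySem.Chars.isupper c = false := by
  by_cases hu : PySem.Chars.isupper c = true
  · exact absurd h (by simp [upper_not_digit c hu])
  · simpa using hu

theorem RESorMEMLoop_QID (rest : List Char) :
    RESorMEMLoop rest "QID" =
      rest.all (fun ch => (PySem.Chars.isalpha ch && PySem.Chars.isupper ch) || PySem.Chars.isdigit ch) := by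
  induction rest with
  | nil => rfl
  | cons ch rest ih =>
      simp only [RESorMEMLoop, List.all_cons, ih]
      by_cases h1 : (PySem.Chars.isalpha ch && PySem.Chars.isupper ch) = true <;>
        by_cases h2 : PySem.Chars.isdigit ch = true <;> simp [h1, h2]

-- the tail check of A over all chars equals the uppercase check over the digit-free residue
theorem all_tail_eq_all_filter (rest : List Char) :
    rest.all (fun ch => (PySem.Chars.isalpha ch && PySem.Chars.isupper ch) || PySem.Chars.isdigit ch) =
      (rest.filter (fun ch => !PySem.Chars.isdigit ch)).all
        (fun ch => PySem.Chars.isalpha ch && PySem.Chars.isupper ch) := by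
  induction rest with
  | nil => rfl
  | cons c r ih =>
      simp only [List.all_cons, List.filter_cons, ih]
      by_cases h : PySem.Chars.isdigit c = true <;> simp [h]

theorem toList_ne_nil_of_ne_empty (s : String) (h : s ≠ "") : s.toList ≠ [] := by
  intro hn
  exact h (String.toList_inj.mp (by simpa using hn))

-- ===== VERDICT (by name: the statement is the Claim_ definition above) =====
theorem RESorMEM_spec : Claim_equal_RESorMEM := by
  intro token _
  unfold Spec_RESorMEM RESorMEM RESorMEM_alt
  by_cases he : token = ""
  · subst he; rfl
  · simp only [beq_iff_eq, he]
    cases hl : token.toList with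
    | nil => exact absurd hl (toList_ne_nil_of_ne_empty token he)
    | cons c rest =>
        simp only [RESorMEMLoop, List.filter_cons]
        by_cases hd : PySem.Chars.isdigit c = true
        · -- first char is a digit: A rejects in Q0; B's residue cannot start with token[0]
          have hguard : (PySem.Chars.isalpha c && PySem.Chars.isupper c) = false := by
            simp [digit_not_upper c hd]
          simp only [hd, Bool.not_true, hguard, Bool.false_eq_true, if_false]
          cases hf : rest.filter (fun ch => !PySem.Chars.isdigit ch) with
          | nil => simp
          | cons l0 ls =>
              have hl0 : PySem.Chars.isdigit l0 = false := by
                have := List.of_mem_filter (l := rest) (p := fun ch => !PySem.Chars.isdigit ch)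
                  (a := l0) (by rw [hf]; exact List.mem_cons_self)
                simpa using this
              have hne : (l0 != c) = true := by
                simp only [bne_iff_ne, ne_eq]
                intro hEq
                rw [hEq, hd] at hl0
                simp at hl0
              simp [hne]
        · -- first char is not a digit: B's residue starts with c
          have hd' : PySem.Chars.isdigit c = false := by simpa using hd
          simp only [hd', Bool.not_false, if_true, bne_self_eq_false, Bool.false_eq_true, if_false,
            List.all_cons]
          by_cases h1 : (PySem.Chars.isalpha c && PySem.Chars.isupper c) = true
          · simp [h1, RESorMEMLoop_QID, all_tail_eq_all_filter]
          · simp [h1]
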